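-- pv_equiv track=rewrite | github.com/dtubb/fichero | scripts/fuzzy_clean.py | combine_single_word_paragraphs
-- ===== SOURCE A (Python) =====
-- def combine_single_word_paragraphs(text):
--     """Combine single-word paragraphs into a single line."""
--     lines = text.splitlines()
--     combined_lines = []
--     current_line = []
--
--     for line in lines:
--         if len(line.split()) == 1:
--             current_line.append(line)
--         else:
--             if current_line:
--                 combined_lines.append(" ".join(current_line))
--                 current_line = []
--             combined_lines.append(line)
--
--     if current_line:
--         combined_lines.append(" ".join(current_line))
--
--     return "\n".join(combined_lines)
-- ===== SOURCE B (Python) =====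
-- def combine_single_word_paragraphs(text):
--     """Combine single-word paragraphs into a single line."""
--     lines = text.splitlines()
--     n = len(lines)
--     out = []
--     i = 0
--     while i < n:
--         if len(lines[i].split()) == 1:
--             j = i + 1
--             while j < n and len(lines[j].split()) == 1:
--                 j += 1
--             out.append(" ".join(lines[i:j]))
--             i = j
--         else:
--             out.append(lines[i])
--             i += 1
--     return "\n".join(out)
-- ===== Notes on version B (the rewrite author's own statement) =====
-- stated objective: alternative
-- what changed: Replaces A's accumulator loop (pending current_line list flushed on non-single lines and after the loop) with run-based scanning: each maximal run of single-word lines is located with an inner forward scan and joined at once, so there is no pending state and no trailing flush.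
import Mathlib
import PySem

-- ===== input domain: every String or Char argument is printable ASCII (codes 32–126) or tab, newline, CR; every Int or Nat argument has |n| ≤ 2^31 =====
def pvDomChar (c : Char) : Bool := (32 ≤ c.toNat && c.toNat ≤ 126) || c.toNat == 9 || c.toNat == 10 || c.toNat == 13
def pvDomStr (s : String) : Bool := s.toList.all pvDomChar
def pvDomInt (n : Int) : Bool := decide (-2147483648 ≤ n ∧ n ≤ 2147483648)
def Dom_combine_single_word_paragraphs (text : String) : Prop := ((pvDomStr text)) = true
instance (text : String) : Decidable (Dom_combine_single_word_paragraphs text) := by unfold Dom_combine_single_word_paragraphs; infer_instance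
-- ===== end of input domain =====

-- B replaces A's pending-accumulator loop with run-based scanning over maximal single-word runs (objective: alternative; return value only).

-- ===== PORT A =====
-- len(line.split()) == 1
def pvSingleA (line : String) : Bool := (PySem.Str.split₀ line).length == 1

-- the for-loop over lines with state (combined_lines, current_line), then the trailing flush
def pvLoopA : List String → List String → List String → List String
  | [], combined, current =>
      combined ++ (if current.isEmpty then [] else [PySem.Str.join " " current])
  | line :: ls, combined, current =>
      if pvSingleA line then
        pvLoopA ls combined (current ++ [line])
      else
        pvLoopA ls ((combined ++ (if current.isEmpty then [] else [PySem.Str.join " " current])) ++ [line]) []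

def combine_single_word_paragraphs (text : String) : String :=
  PySem.Str.join "\n" (pvLoopA (PySem.Str.splitlines text) [] [])

-- ===== PORT B =====
def pvSingleB (line : String) : Bool := (PySem.Str.split₀ line).length == 1

-- the outer while loop; a single-word line starts an inner forward scan (`takeWhile`) over its
-- maximal run (= lines[i:j]), which is joined at once; scanning resumes after the run (`dropWhile`)
def pvRunScan : List String → List String
  | [] => []
  | line :: ls =>
      if pvSingleB line then
        PySem.Str.join " " (line :: ls.takeWhile pvSingleB) :: pvRunScan (ls.dropWhile pvSingleB)
      else
        line :: pvRunScan ls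
termination_by ls => ls.length
decreasing_by
  · exact Nat.lt_succ_of_le (List.length_dropWhile_le _ _)
  · exact Nat.lt_succ_self _

def combine_single_word_paragraphs_alt (text : String) : String :=
  PySem.Str.join "\n" (pvRunScan (PySem.Str.splitlines text))

-- ===== PRECONDITION & SPEC =====
def Spec_combine_single_word_paragraphs (text : String) (out : String) : Prop := out = combine_single_word_paragraphs_alt text
instance (text : String) (out : String) : Decidable (Spec_combine_single_word_paragraphs text out) := by unfold Spec_combine_single_word_paragraphs; infer_instance

-- ===== CLAIM (what is proved, stated in full; the proofs are below) =====
def Claim_equal_combine_single_word_paragraphs : Prop := ∀ (text : String), Dom_combine_single_word_paragraphs text → Spec_combine_single_word_paragraphs text (combine_single_word_paragraphs text)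

-- ===== LEMMAS AND PROOFS =====

theorem pvSingle_eq : pvSingleA = pvSingleB := rfl

-- The core correspondence: A's loop from any state (combined, current) equals
-- combined, then (if a run is pending) the pending run fused with the next single-word run, then B's scan of the rest.
theorem pvLoopA_eq_runScan : ∀ (ls combined current : List String),
    pvLoopA ls combined current =
      combined ++
        (if current.isEmpty then pvRunScan ls
         else PySem.Str.join " " (current ++ ls.takeWhile pvSingleB) :: pvRunScan (ls.dropWhile pvSingleB)) := by
  intro ls
  induction ls with
  | nil =>
      intro combined current
      cases current with
      | nil => simp [pvLoopA, pvRunScan]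
      | cons c cs => simp [pvLoopA, pvRunScan]
  | cons line ls ih =>
      intro combined current
      by_cases h : pvSingleA line
      · have hB : pvSingleB line := h
        rw [pvLoopA, if_pos h, ih]
        cases current with
        | nil =>
            simp [pvRunScan, hB]
        | cons c cs =>
            simp [hB]
      · have hB : pvSingleB line = false := by simpa [pvSingle_eq] using h
        rw [pvLoopA, if_neg h, ih]
        cases current with
        | nil =>
            simp [pvRunScan, hB]
        | cons c cs =>
            simp [pvRunScan, hB]

-- ===== VERDICT (by name: the statement is the Claim_ definition above) =====
theorem combine_single_word_paragraphs_spec : Claim_equal_combine_single_word_paragraphs := by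
  intro text _
  unfold Spec_combine_single_word_paragraphs combine_single_word_paragraphs combine_single_word_paragraphs_alt
  rw [pvLoopA_eq_runScan]
  simp
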